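-- pv_equiv track=rewrite | github.com/NeoBitose/Codingan_kuliah | Sem_2/sem2_modul5_devide-conquer/2.2.py | selisihMerge
-- ===== SOURCE A (Python) =====
-- def selisihMerge(listdata):
--     tmp = len(listdata)
--     n = len(listdata)
--     if n == 1:
--         return 0
--     elif n == 2:
--         return abs(listdata[0] - listdata[1])
--     else:
--         nilai_tengah = n // 2
--         kiri = selisihMerge(listdata[:nilai_tengah])
--         kanan = selisihMerge(listdata[nilai_tengah:])
--
--         if n == tmp:
--             cross = abs(listdata[nilai_tengah-1] - listdata[nilai_tengah])
--         else:
--             cross = 0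
--         data = max([kiri,kanan,cross])
--         return data
-- ===== SOURCE B (Python) =====
-- def selisihMerge(listdata):
--     best = 0
--     for a, b in zip(listdata, listdata[1:]):
--         d = abs(a - b)
--         if d > best:
--             best = d
--     return best
-- ===== Notes on version B (the rewrite author's own statement) =====
-- stated objective: faster
-- what changed: Replaces the divide-and-conquer recursion with slicing at every level by a single linear pass over adjacent pairs keeping the running maximum absolute difference.
import Mathlib
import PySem

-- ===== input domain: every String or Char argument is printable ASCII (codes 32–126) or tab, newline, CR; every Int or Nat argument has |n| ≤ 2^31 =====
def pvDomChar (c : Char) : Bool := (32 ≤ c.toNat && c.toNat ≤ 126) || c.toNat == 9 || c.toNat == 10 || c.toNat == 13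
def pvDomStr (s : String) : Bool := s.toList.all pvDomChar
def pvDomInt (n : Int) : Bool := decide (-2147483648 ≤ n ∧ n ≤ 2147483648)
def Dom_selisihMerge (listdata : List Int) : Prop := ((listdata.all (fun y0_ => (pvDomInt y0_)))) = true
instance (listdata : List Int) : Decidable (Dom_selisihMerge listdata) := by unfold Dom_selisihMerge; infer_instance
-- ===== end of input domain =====

-- B replaces A's O(n log n) divide-and-conquer (slicing at every level) by one linear
-- scan over adjacent pairs keeping the running maximum absolute difference.

-- ===== PORT A =====
-- Termination lemmas cited by the port's decreasing_by (port needs them by name).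
theorem pvA_take_lt (l : List Int) (h3 : 3 ≤ l.length) :
    (PySem.List.slice l none (some (PySem.Int.floordiv (l.length : Int) 2))).length < l.length := by
  rw [show (PySem.Int.floordiv (l.length : Int) 2) = ((l.length / 2 : Nat) : Int) from
    PySem.Int.floordiv_natCast l.length 2, PySem.List.slice_to_natCast]
  simp [List.length_take]; omega

theorem pvA_drop_lt (l : List Int) (h3 : 3 ≤ l.length) :
    (PySem.List.slice l (some (PySem.Int.floordiv (l.length : Int) 2)) none).length < l.length := by
  rw [show (PySem.Int.floordiv (l.length : Int) 2) = ((l.length / 2 : Nat) : Int) from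
    PySem.Int.floordiv_natCast l.length 2, PySem.List.slice_from_natCast]
  simp [List.length_drop]; omega

def selisihMerge (listdata : List Int) : Int :=
  let tmp : Int := listdata.length
  let n : Int := listdata.length
  if n == 1 then 0
  else if n == 2 then
    |(PySem.List.pyGet? listdata 0).getD 0 - (PySem.List.pyGet? listdata 1).getD 0|
  else if listdata.length < 3 then 0
    -- totality guard: here length is 0, where Python recurses forever; excluded by Pre_
  else
    let nilai_tengah := PySem.Int.floordiv n 2
    let kiri := selisihMerge (PySem.List.slice listdata none (some nilai_tengah))
    let kanan := selisihMerge (PySem.List.slice listdata (some nilai_tengah) none)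
    let cross :=
      if n == tmp then
        |(PySem.List.pyGet? listdata (nilai_tengah - 1)).getD 0 -
          (PySem.List.pyGet? listdata nilai_tengah).getD 0|
      else 0
    (PySem.List.max? [kiri, kanan, cross] (fun x => x)).getD 0
termination_by listdata.length
decreasing_by
  · exact pvA_take_lt listdata (by omega)
  · exact pvA_drop_lt listdata (by omega)

-- ===== PORT B =====
def selisihMerge_alt (listdata : List Int) : Int :=
  (listdata.zip (PySem.List.slice listdata (some 1) none)).foldl
    (fun best p => let d := |p.1 - p.2|; if d > best then d else best) 0

-- ===== PRECONDITION & SPEC =====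
-- Pre_ excludes only the empty list, on which A raises RecursionError (unbounded recursion).
def Pre_selisihMerge (listdata : List Int) : Prop := listdata ≠ []
instance (listdata : List Int) : Decidable (Pre_selisihMerge listdata) := by
  unfold Pre_selisihMerge; infer_instance
def pvWitness_selisihMerge : List Int := [3, -1, 4, 1]

def Spec_selisihMerge (listdata : List Int) (out : Int) : Prop := out = selisihMerge_alt listdata
instance (listdata : List Int) (out : Int) : Decidable (Spec_selisihMerge listdata out) := by
  unfold Spec_selisihMerge; infer_instance

-- ===== CLAIM (what is proved, stated in full; the proofs are below) =====
def Claim_equal_selisihMerge : Prop := ∀ (listdata : List Int), Dom_selisihMerge listdata → Pre_selisihMerge listdata → Spec_selisihMerge listdata (selisihMerge listdata)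

-- ===== LEMMAS AND PROOFS =====

/-- the fold step of B, rewritten as `max` -/
def pvG (best : Int) (p : Int × Int) : Int := max best |p.1 - p.2|

def pvZipTail (l : List Int) : List (Int × Int) := l.zip l.tail

/-- the value B computes -/
def pvM (l : List Int) : Int := (pvZipTail l).foldl pvG 0

theorem pvStep_eq_g :
    (fun (best : Int) (p : Int × Int) => let d := |p.1 - p.2|; if d > best then d else best)
      = pvG := by
  funext best p
  simp only [pvG]
  split <;> omega

theorem pvAlt_eq_M (l : List Int) : selisihMerge_alt l = pvM l := by
  unfold selisihMerge_alt pvM pvZipTail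
  rw [PySem.List.slice_from_one, pvStep_eq_g]

theorem pvFoldG_acc (s : List (Int × Int)) (a : Int) (ha : 0 ≤ a) :
    s.foldl pvG a = max a (s.foldl pvG 0) := by
  induction s generalizing a with
  | nil => simp only [List.foldl_nil]; omega
  | cons p t ih =>
      simp only [List.foldl_cons]
      rw [ih (pvG a p) (le_trans ha (le_max_left _ _)),
          ih (pvG 0 p) (le_trans (abs_nonneg _) (le_max_right _ _))]
      simp only [pvG]
      omega

theorem pvZipTail_append (xs ys : List Int) (hx : xs ≠ []) (hy : ys ≠ []) :
    pvZipTail (xs ++ ys) = pvZipTail xs ++ (xs.getLastD 0, ys.headD 0) :: pvZipTail ys := by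
  induction xs with
  | nil => exact absurd rfl hx
  | cons a t ih =>
      cases t with
      | nil =>
          cases ys with
          | nil => exact absurd rfl hy
          | cons b u => simp [pvZipTail]
      | cons b r =>
          have := ih (by simp)
          simp only [pvZipTail] at *
          simpa [List.zip] using this

theorem pvM_split (xs ys : List Int) (hx : xs ≠ []) (hy : ys ≠ []) :
    pvM (xs ++ ys) = max (max (pvM xs) |xs.getLastD 0 - ys.headD 0|) (pvM ys) := by
  unfold pvM
  rw [pvZipTail_append xs ys hx hy, List.foldl_append, List.foldl_cons]
  rw [pvFoldG_acc (pvZipTail ys) (pvG ((pvZipTail xs).foldl pvG 0) (xs.getLastD 0, ys.headD 0))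
    (le_trans (abs_nonneg _) (le_max_right _ _))]
  simp only [pvG]

theorem pvMain : ∀ (n : Nat) (l : List Int), l.length = n → l ≠ [] → selisihMerge l = pvM l := by
  intro n
  induction n using Nat.strong_induction_on with
  | _ n ih =>
    intro l hlen hne
    by_cases h1 : l.length = 1
    · obtain ⟨a, rfl⟩ : ∃ a, l = [a] := by
        cases l with
        | nil => simp at h1
        | cons a t => cases t with
          | nil => exact ⟨a, rfl⟩
          | cons b u => simp at h1
      simp [selisihMerge, pvM, pvZipTail]
    · by_cases h2 : l.length = 2
      · obtain ⟨a, b, rfl⟩ : ∃ a b, l = [a, b] := by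
          cases l with
          | nil => simp at h2
          | cons a t => cases t with
            | nil => simp at h2
            | cons b u => cases u with
              | nil => exact ⟨a, b, rfl⟩
              | cons c v => simp at h2
        simp [selisihMerge, pvM, pvZipTail, PySem.List.pyGet?, PySem.List.pyIdx?, pvG]
      · have h3 : 3 ≤ l.length := by
          cases l with
          | nil => exact absurd rfl hne
          | cons a t => simp only [List.length_cons] at h1 h2 ⊢; omega
        have hm1 : 1 ≤ l.length / 2 := by omega
        have hmlt : l.length / 2 < l.length := by omega
        have hne1 : ((l.length : Int) == 1) = false := by
          simp only [beq_eq_false_iff_ne]; omega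
        have hne2 : ((l.length : Int) == 2) = false := by
          simp only [beq_eq_false_iff_ne]; omega
        rw [selisihMerge]
        simp only [hne1, hne2, Bool.false_eq_true, if_false, if_neg (by omega : ¬ l.length < 3),
          beq_self_eq_true, if_true]
        rw [show PySem.Int.floordiv ((l.length : Int)) 2 = ((l.length / 2 : Nat) : Int) from
          PySem.Int.floordiv_natCast l.length 2]
        have htne : l.take (l.length / 2) ≠ [] :=
          List.ne_nil_of_length_pos (by rw [List.length_take_of_le hmlt.le]; omega)
        have hdne : l.drop (l.length / 2) ≠ [] :=
          List.ne_nil_of_length_pos (by rw [List.length_drop]; omega)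
        have hkiri : selisihMerge (PySem.List.slice l none (some ((l.length / 2 : Nat) : Int)))
            = pvM (l.take (l.length / 2)) := by
          rw [PySem.List.slice_to_natCast]
          have hlt : (l.take (l.length / 2)).length < n := by
            rw [List.length_take_of_le hmlt.le]; omega
          exact ih _ hlt _ rfl htne
        have hkanan : selisihMerge (PySem.List.slice l (some ((l.length / 2 : Nat) : Int)) none)
            = pvM (l.drop (l.length / 2)) := by
          rw [PySem.List.slice_from_natCast]
          have hlt : (l.drop (l.length / 2)).length < n := by
            rw [List.length_drop]; omega
          exact ih _ hlt _ rfl hdne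
        have hg1 : PySem.List.pyGet? l (((l.length / 2 : Nat) : Int) - 1)
            = some (l[l.length / 2 - 1]'(by omega)) := by
          rw [show (((l.length / 2 : Nat) : Int) - 1) = ((l.length / 2 - 1 : Nat) : Int) by omega,
            PySem.List.pyGet?_natCast]
          simp [List.getElem?_eq_getElem (show l.length / 2 - 1 < l.length by omega)]
        have hg2 : PySem.List.pyGet? l ((l.length / 2 : Nat) : Int)
            = some (l[l.length / 2]'(by omega)) := by
          rw [PySem.List.pyGet?_natCast]
          simp [List.getElem?_eq_getElem (show l.length / 2 < l.length by omega)]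
        rw [hkiri, hkanan, hg1, hg2, PySem.List.max?_id_cons]
        simp only [List.foldl_cons, List.foldl_nil, Option.getD_some]
        have hsplit := pvM_split (l.take (l.length / 2)) (l.drop (l.length / 2)) htne hdne
        rw [List.take_append_drop] at hsplit
        have hlast : (l.take (l.length / 2)).getLastD 0 = l[l.length / 2 - 1]'(by omega) := by
          rw [List.getLastD_eq_getLast?, List.getLast?_eq_getElem?, List.length_take_of_le hmlt.le]
          rw [List.getElem?_take_of_lt (by omega)]
          simp [List.getElem?_eq_getElem (show l.length / 2 - 1 < l.length by omega)]
        have hhead : (l.drop (l.length / 2)).headD 0 = l[l.length / 2]'(by omega) := by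
          rw [List.headD_eq_head?, List.head?_eq_getElem?]
          simp [List.getElem?_drop]
          rw [List.getElem?_eq_getElem (show l.length / 2 < l.length by omega)]
          rfl
        rw [hsplit, hlast, hhead]
        omega

-- ===== VERDICT (by name: the statement is the Claim_ definition above) =====
theorem selisihMerge_spec : Claim_equal_selisihMerge := by
  intro l _ hpre
  unfold Spec_selisihMerge
  rw [pvAlt_eq_M l, pvMain l.length l rfl hpre]
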